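-- pv_equiv track=rewrite | github.com/xy-always/EARA | src/get_similarity.py | get_sim
-- ===== SOURCE A (Python) =====
-- def get_sim(sentence):
--     length = len(sentence)
--     sim_matrix = []
--     for i, w in enumerate(sentence):
--         # sim_matrix = []
--         for j, w1 in enumerate(sentence):
--             if w == w1:
--                 sim_matrix.append(1)
--             else:
--                 sim_matrix.append(0)
--         # sim_matrix.append(sim)
--
--     return sim_matrix
-- ===== SOURCE B (Python) =====
-- def get_sim(sentence):
--     rows = {}
--     for w in sentence:
--         if w not in rows:
--             rows[w] = [1 if x == w else 0 for x in sentence]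
--     out = []
--     for w in sentence:
--         out.extend(rows[w])
--     return out
-- ===== Notes on version B (the rewrite author's own statement) =====
-- stated objective: alternative
-- what changed: B precomputes one indicator row per distinct word in a dict and assembles the output by concatenating the cached rows, instead of A's nested pairwise comparison loop.
import Mathlib
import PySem

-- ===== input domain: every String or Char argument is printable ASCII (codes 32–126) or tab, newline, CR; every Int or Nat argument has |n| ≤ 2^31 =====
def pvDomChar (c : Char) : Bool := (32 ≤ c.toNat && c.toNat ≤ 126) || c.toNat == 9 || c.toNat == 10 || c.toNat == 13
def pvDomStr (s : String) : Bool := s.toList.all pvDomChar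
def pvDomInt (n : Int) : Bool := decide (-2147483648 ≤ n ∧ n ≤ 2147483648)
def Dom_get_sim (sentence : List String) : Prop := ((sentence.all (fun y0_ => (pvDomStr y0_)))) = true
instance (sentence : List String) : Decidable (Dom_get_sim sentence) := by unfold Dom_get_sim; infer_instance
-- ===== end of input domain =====

-- B replaces A's nested pairwise comparison with a dict of precomputed indicator rows
-- (one row per distinct word), then concatenates the cached rows; same return value (alternative structure).

-- ===== PORT A =====
-- nested loop: for each w, for each w1, append 1/0
def get_sim (sentence : List String) : List Int :=
  sentence.foldl
    (fun acc w =>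
      sentence.foldl (fun acc2 w1 => acc2 ++ [if w = w1 then (1 : Int) else 0]) acc)
    []

-- ===== PORT B =====
-- rows[w] = indicator row of w, built once per distinct word
def pvRow (sentence : List String) (w : String) : List Int :=
  sentence.map (fun x => if x = w then (1 : Int) else 0)

def pvRows (sentence : List String) : PySem.Dict String (List Int) :=
  sentence.foldl
    (fun d w => if d.contains w then d else d.insert w (pvRow sentence w))
    PySem.Dict.empty

def get_sim_alt (sentence : List String) : List Int :=
  let rows := pvRows sentence
  -- rows[w]: key is always present, so getD is exact here
  sentence.foldl (fun out w => out ++ rows.getD w []) []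

-- ===== PRECONDITION & SPEC =====
def Spec_get_sim (sentence : List String) (out : List Int) : Prop := out = get_sim_alt sentence
instance (sentence : List String) (out : List Int) : Decidable (Spec_get_sim sentence out) := by unfold Spec_get_sim; infer_instance

-- ===== CLAIM (what is proved, stated in full; the proofs are below) =====
def Claim_equal_get_sim : Prop := ∀ (sentence : List String), Dom_get_sim sentence → Spec_get_sim sentence (get_sim sentence)

-- ===== LEMMAS AND PROOFS =====

theorem foldl_app_singleton (f : String → Int) :
    ∀ (l : List String) (acc : List Int),
      l.foldl (fun a x => a ++ [f x]) acc = acc ++ l.map f := by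
  intro l
  induction l with
  | nil => simp
  | cons x xs ih => intro acc; simp [List.foldl, ih]

theorem foldl_app_flat (g : String → List Int) :
    ∀ (l : List String) (acc : List Int),
      l.foldl (fun a x => a ++ g x) acc = acc ++ l.flatMap g := by
  intro l
  induction l with
  | nil => simp
  | cons x xs ih => intro acc; simp [List.foldl, ih]

theorem get_sim_eq_flat (sentence : List String) :
    get_sim sentence = sentence.flatMap (pvRow sentence) := by
  unfold get_sim
  have h : ∀ (l : List String) (acc : List Int),
      l.foldl (fun acc w =>
        sentence.foldl (fun a x => a ++ [if w = x then (1 : Int) else 0]) acc) acc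
        = acc ++ l.flatMap (pvRow sentence) := by
    intro l
    induction l with
    | nil => simp
    | cons w ws ih =>
      intro acc
      simp only [List.foldl, List.flatMap_cons]
      rw [ih, foldl_app_singleton (fun x => if w = x then (1 : Int) else 0)]
      have : pvRow sentence w = sentence.map (fun x => if w = x then (1 : Int) else 0) := by
        unfold pvRow
        exact List.map_congr_left (fun x _ => by
          by_cases h : x = w
          · simp [h]
          · simp [if_neg h, if_neg (Ne.symm h)])
      simp [this]
  simpa using h sentence []

-- invariant: every stored value is the right row; key once seen is present
theorem pvRows_inv (sentence : List String) :
    ∀ (l : List String) (d : PySem.Dict String (List Int)),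
      (∀ w, d.get? w = none ∨ d.get? w = some (pvRow sentence w)) →
      (∀ w, (l.foldl (fun d w => if d.contains w then d
              else d.insert w (pvRow sentence w)) d).get? w = none ∨
            (l.foldl (fun d w => if d.contains w then d
              else d.insert w (pvRow sentence w)) d).get? w = some (pvRow sentence w)) := by
  intro l
  induction l with
  | nil => intro d hd; simpa using hd
  | cons x xs ih =>
    intro d hd
    simp only [List.foldl]
    apply ih
    by_cases hc : d.contains x = true
    · rw [if_pos hc]; exact hd
    · rw [if_neg hc]
      intro w
      rw [PySem.Dict.get?_insert]
      by_cases hw : w = x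
      · subst hw; simp
      · simp [hw]; exact hd w

theorem pvRows_contains (sentence : List String) :
    ∀ (l : List String) (d : PySem.Dict String (List Int)) (w : String),
      (w ∈ l ∨ d.contains w = true) →
      (l.foldl (fun d w => if d.contains w then d
          else d.insert w (pvRow sentence w)) d).contains w = true := by
  intro l
  induction l with
  | nil => intro d w h; simpa using h.resolve_left (by simp)
  | cons x xs ih =>
    intro d w h
    simp only [List.foldl]
    apply ih
    rcases h with h | h
    · rcases List.mem_cons.mp h with rfl | h
      · right
        by_cases hc : d.contains w = true
        · simp [hc]
        · simp [hc, PySem.Dict.contains_insert_self]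
      · exact Or.inl h
    · right
      by_cases hc : d.contains x = true
      · simp [hc, h]
      · simp [hc, PySem.Dict.contains_insert, h]

theorem pvRows_getD (sentence : List String) (w : String) (hw : w ∈ sentence) :
    (pvRows sentence).getD w [] = pvRow sentence w := by
  have hc : (pvRows sentence).contains w = true :=
    pvRows_contains sentence sentence PySem.Dict.empty w (Or.inl hw)
  have hinv := pvRows_inv sentence sentence PySem.Dict.empty (by simp) w
  rw [PySem.Dict.contains_eq_isSome_get?] at hc
  rcases hinv with h | h
  · rw [show (pvRows sentence).get? w = _ from h] at hc; simp at hc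
  · rw [PySem.Dict.getD_eq_get?_getD, show (pvRows sentence).get? w = _ from h]
    rfl

theorem get_sim_alt_eq_flat (sentence : List String) :
    get_sim_alt sentence = sentence.flatMap (pvRow sentence) := by
  unfold get_sim_alt
  rw [foldl_app_flat]
  simp only [List.nil_append]
  apply List.flatMap_congr  -- pointwise equality on members
  intro w hw
  exact pvRows_getD sentence w hw

-- ===== VERDICT (by name: the statement is the Claim_ definition above) =====
theorem get_sim_spec : Claim_equal_get_sim := by
  intro sentence _
  unfold Spec_get_sim
  rw [get_sim_eq_flat, get_sim_alt_eq_flat]
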